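-- pv_equiv track=rewrite | github.com/BhagyashreeD12/STTTTS_version1 | scripts/middleware_cafe.py | _strip_correction_prefixes
-- ===== SOURCE A (Python) =====
-- def _strip_correction_prefixes(text: str) -> str:
--     prefixes = [
--         "no ",
--         "no, ",
--         "actually ",
--         "actually, ",
--         "sorry ",
--         "sorry, ",
--         "i mean ",
--         "i mean, ",
--         "wait ",
--         "wait, ",
--         "not that ",
--         "not this ",
--         "instead ",
--     ]
--     cleaned = text.strip().lower()
--     for p in prefixes:
--         if cleaned.startswith(p):
--             return cleaned[len(p) :].strip()
--     return cleaned
-- ===== SOURCE B (Python) =====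
-- _ONE_WORD_HEADS = ("no", "no,", "actually", "actually,", "sorry", "sorry,", "wait", "wait,", "instead")
--
-- def _strip_correction_prefixes(text: str) -> str:
--     # Dispatch on the first whitespace-free token instead of testing 13 prefixes.
--     cleaned = text.strip().lower()
--     i = cleaned.find(" ")
--     if i < 0:
--         return cleaned
--     head = cleaned[:i]
--     tail = cleaned[i + 1:]
--     if head in _ONE_WORD_HEADS:
--         return tail.strip()
--     if head in ("i", "not"):
--         j = tail.find(" ")
--         if j >= 0:
--             head2 = tail[:j]
--             if (head == "i" and head2 in ("mean", "mean,")) or (head == "not" and head2 in ("that", "this")):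
--                 return tail[j + 1:].strip()
--     return cleaned
-- ===== Notes on version B (the rewrite author's own statement) =====
-- stated objective: alternative
-- what changed: Replaces the 13-fold startswith scan over a prefix list by a single split of the cleaned text at its first space and a dispatch on the first token (with one more split for the two-word prefixes).
import Mathlib
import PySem

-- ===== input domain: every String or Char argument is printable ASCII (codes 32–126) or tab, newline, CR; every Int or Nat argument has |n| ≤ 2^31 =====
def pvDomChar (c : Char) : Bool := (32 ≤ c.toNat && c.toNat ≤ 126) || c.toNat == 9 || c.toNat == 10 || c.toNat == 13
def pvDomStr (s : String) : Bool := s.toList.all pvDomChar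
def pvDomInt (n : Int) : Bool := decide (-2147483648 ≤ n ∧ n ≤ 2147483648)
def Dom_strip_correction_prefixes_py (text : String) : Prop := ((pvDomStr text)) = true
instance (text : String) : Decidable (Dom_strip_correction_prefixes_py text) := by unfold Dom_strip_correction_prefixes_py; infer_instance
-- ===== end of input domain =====

-- B replaces A's 13-prefix startswith scan by a single split at the first space and a
-- dispatch on the first token (objective: alternative; same exact return value).

-- ===== PORT A =====
def pvPrefixes : List String :=
  ["no ", "no, ", "actually ", "actually, ", "sorry ", "sorry, ",
   "i mean ", "i mean, ", "wait ", "wait, ", "not that ", "not this ", "instead "]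

def pvLoopA (cleaned : String) : List String → String
  | [] => cleaned
  | p :: ps =>
    if PySem.Str.startswith cleaned p then
      PySem.Str.strip (PySem.Str.slice cleaned (some (PySem.Str.len p)) none)
    else pvLoopA cleaned ps

def strip_correction_prefixes_py (text : String) : String :=
  let cleaned := PySem.Str.lower (PySem.Str.strip text)
  pvLoopA cleaned pvPrefixes

-- ===== PORT B =====
def pvOneWordHeads : List String :=
  ["no", "no,", "actually", "actually,", "sorry", "sorry,", "wait", "wait,", "instead"]

def strip_correction_prefixes_py_alt (text : String) : String :=
  let cleaned := PySem.Str.lower (PySem.Str.strip text)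
  let i := PySem.Str.find cleaned " "
  if i < 0 then cleaned
  else
    let head := PySem.Str.slice cleaned none (some i)
    let tail := PySem.Str.slice cleaned (some (i + 1)) none
    if head ∈ pvOneWordHeads then PySem.Str.strip tail
    else if head = "i" ∨ head = "not" then
      let j := PySem.Str.find tail " "
      if 0 ≤ j then
        let head2 := PySem.Str.slice tail none (some j)
        if (head = "i" ∧ (head2 = "mean" ∨ head2 = "mean,")) ∨
           (head = "not" ∧ (head2 = "that" ∨ head2 = "this")) then
          PySem.Str.strip (PySem.Str.slice tail (some (j + 1)) none)
        else cleaned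
      else cleaned
    else cleaned

-- ===== PRECONDITION & SPEC =====
def Spec_strip_correction_prefixes_py (text : String) (out : String) : Prop := out = strip_correction_prefixes_py_alt text
instance (text : String) (out : String) : Decidable (Spec_strip_correction_prefixes_py text out) := by unfold Spec_strip_correction_prefixes_py; infer_instance

-- ===== CLAIM (what is proved, stated in full; the proofs are below) =====
def Claim_equal_strip_correction_prefixes_py : Prop := ∀ (text : String), Dom_strip_correction_prefixes_py text → Spec_strip_correction_prefixes_py text (strip_correction_prefixes_py text)

-- ===== LEMMAS AND PROOFS =====

theorem pv_toList_ofList (l : List Char) : (String.ofList l).toList = l := by simp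

theorem pv_ofList_eq_iff (l : List Char) (s : String) : (String.ofList l = s) ↔ l = s.toList := by
  constructor
  · rintro rfl; simp
  · rintro rfl; simp

theorem pv_singleton_prefix {a : Char} {l : List Char} : ([a] <+: l) ↔ ∃ t, l = a :: t := by
  cases l with
  | nil => simp
  | cons x xs =>
    rw [List.cons_prefix_cons]
    constructor
    · rintro ⟨rfl, -⟩; exact ⟨xs, rfl⟩
    · rintro ⟨t, ht⟩; cases ht; exact ⟨rfl, List.nil_prefix⟩

-- first-space decomposition is unique: (w ++ ' ' :: r) is a prefix of (h ++ ' ' :: t)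
-- iff w = h and r is a prefix of t, when neither w nor h contains a space
theorem pv_keyL (w : List Char) (r h t : List Char) (hw : ' ' ∉ w) (hh : ' ' ∉ h) :
    ((w ++ ' ' :: r) <+: (h ++ ' ' :: t)) ↔ (w = h ∧ r <+: t) := by
  induction w generalizing h with
  | nil =>
    cases h with
    | nil => simp [List.cons_prefix_cons]
    | cons c h' =>
      simp only [List.nil_append, List.cons_append, List.cons_prefix_cons]
      constructor
      · rintro ⟨rfl, -⟩; exact absurd (List.mem_cons_self) hh
      · rintro ⟨h, -⟩; cases h
  | cons a w' ih =>
    cases h with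
    | nil =>
      simp only [List.cons_append, List.nil_append, List.cons_prefix_cons]
      constructor
      · rintro ⟨rfl, -⟩; exact absurd (List.mem_cons_self) hw
      · rintro ⟨h, -⟩; cases h
    | cons c h' =>
      simp only [List.cons_append, List.cons_prefix_cons]
      have hw' : ' ' ∉ w' := fun hm => hw (List.mem_cons_of_mem _ hm)
      have hh' : ' ' ∉ h' := fun hm => hh (List.mem_cons_of_mem _ hm)
      rw [ih h' hw' hh']
      constructor
      · rintro ⟨rfl, rfl, hp⟩; exact ⟨rfl, hp⟩
      · rintro ⟨he, hp⟩; cases he; exact ⟨rfl, rfl, hp⟩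

theorem pv_first_split {a : Char} {l : List Char} (h : a ∈ l) :
    ∃ s t, l = s ++ a :: t ∧ a ∉ s := by
  induction l with
  | nil => cases h
  | cons x xs ih =>
    by_cases hx : x = a
    · exact ⟨[], xs, by simp [hx], by simp⟩
    · obtain ⟨s, t, rfl, hns⟩ := ih ((List.mem_cons.mp h).resolve_left (fun he => hx he.symm))
      exact ⟨x :: s, t, rfl, by simp only [List.mem_cons]; rintro (rfl | hm); exacts [hx rfl, hns hm]⟩

-- find of ' ' at its first occurrence
theorem pv_findSpace (H T : List Char) (hH : ' ' ∉ H) :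
    PySem.Chars.find (H ++ ' ' :: T) [' '] = (H.length : Int) := by
  have hin : ([' '] : List Char) <:+: (H ++ ' ' :: T) := ⟨H, T, by simp⟩
  have h0 : 0 ≤ PySem.Chars.find (H ++ ' ' :: T) [' '] := (PySem.Chars.find_nonneg_iff _ _).mpr hin
  obtain ⟨h1, h2⟩ := PySem.Chars.find_spec h0
  set n := (PySem.Chars.find (H ++ ' ' :: T) [' ']).toNat with hn
  have hpref : ([' '] : List Char) <+: (H ++ ' ' :: T).drop H.length := by
    rw [List.drop_left]; exact ⟨T, rfl⟩
  have hle : n ≤ H.length := by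
    by_contra hgt
    exact h2 H.length (by omega) hpref
  have heq : n = H.length := by
    rcases Nat.lt_or_ge n H.length with hlt | hge
    · exfalso
      obtain ⟨t, ht⟩ := pv_singleton_prefix.mp h1
      have hget : (H ++ ' ' :: T)[n]? = some ' ' := by
        rw [← List.head?_drop, ht]; rfl
      rw [List.getElem?_append_left (by omega)] at hget
      have hg : H[n]? = some ' ' := hget
      have hmem : ' ' ∈ H := by
        have hn' : n < H.length := hlt
        have := List.getElem?_eq_getElem hn' ▸ hg
        simp at this
        exact this ▸ List.getElem_mem hn'
      exact hH hmem
    · omega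
  omega

theorem pv_sw2 (c : String) (H T : List Char) (heq : c.toList = H ++ ' ' :: T) (hH : ' ' ∉ H)
    (p : String) (w r : List Char) (hw : ' ' ∉ w) (hp : p.toList = w ++ ' ' :: r) :
    PySem.Str.startswith c p = (decide (H = w) && decide (r <+: T)) := by
  simp only [PySem.Str.startswith, PySem.Chars.startswith]
  rw [heq, hp, Bool.eq_iff_iff]
  simp only [List.isPrefixOf_iff_prefix, Bool.and_eq_true, decide_eq_true_eq]
  rw [pv_keyL w r H T hw hH]
  exact ⟨fun ⟨a, b⟩ => ⟨a.symm, b⟩, fun ⟨a, b⟩ => ⟨a.symm, b⟩⟩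

theorem pv_sw_false_of_no_space (c : String) (hsp : ' ' ∉ c.toList) (p : String)
    (hp : ' ' ∈ p.toList) : PySem.Str.startswith c p = false := by
  simp only [PySem.Str.startswith, PySem.Chars.startswith]
  rw [Bool.eq_false_iff]
  intro h
  exact hsp ((List.isPrefixOf_iff_prefix.mp h).subset hp)

theorem pv_loopA_all_false (c : String) (ps : List String)
    (h : ∀ p ∈ ps, PySem.Str.startswith c p = false) : pvLoopA c ps = c := by
  induction ps with
  | nil => rfl
  | cons p ps ih =>
    simp only [pvLoopA, h p (List.mem_cons_self), Bool.false_eq_true, if_false]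
    exact ih (fun q hq => h q (List.mem_cons_of_mem _ hq))

theorem pv_slice_head (s : String) (H T : List Char) (heq : s.toList = H ++ ' ' :: T) :
    PySem.Str.slice s none (some (H.length : Int)) = String.ofList H := by
  simp only [PySem.Str.slice, PySem.Chars.slice_eq_listSlice, heq,
             PySem.List.slice_to_natCast, List.take_left]

theorem pv_slice_tail (s : String) (H T : List Char) (heq : s.toList = H ++ ' ' :: T) :
    PySem.Str.slice s (some ((H.length : Int) + 1)) none = String.ofList T := by
  have hc : ((H.length : Int) + 1) = ((H.length + 1 : Nat) : Int) := by push_cast; ring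
  rw [hc]
  simp only [PySem.Str.slice, PySem.Chars.slice_eq_listSlice, heq, PySem.List.slice_from_natCast]
  congr 1
  rw [show H ++ ' ' :: T = (H ++ [' ']) ++ T by simp, List.drop_left' (by simp)]

-- central lemma: A's prefix loop equals B's first-token dispatch, on any cleaned string
theorem pv_central (c : String) :
    pvLoopA c pvPrefixes =
      (let i := PySem.Str.find c " "
       if i < 0 then c
       else
         let head := PySem.Str.slice c none (some i)
         let tail := PySem.Str.slice c (some (i + 1)) none
         if head ∈ pvOneWordHeads then PySem.Str.strip tail
         else if head = "i" ∨ head = "not" then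
           let j := PySem.Str.find tail " "
           if 0 ≤ j then
             let head2 := PySem.Str.slice tail none (some j)
             if (head = "i" ∧ (head2 = "mean" ∨ head2 = "mean,")) ∨
                (head = "not" ∧ (head2 = "that" ∨ head2 = "this")) then
               PySem.Str.strip (PySem.Str.slice tail (some (j + 1)) none)
             else c
           else c
         else c) := by
  by_cases hsp : ' ' ∈ c.toList
  · obtain ⟨H, T, heq, hH⟩ := pv_first_split hsp
    have hfind : PySem.Str.find c " " = (H.length : Int) := by
      simp only [PySem.Str.find, heq, show (" " : String).toList = [' '] from by decide]
      exact pv_findSpace H T hH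
    have hhead := pv_slice_head c H T heq
    have htail := pv_slice_tail c H T heq
    have e1 := pv_sw2 c H T heq hH "no " ['n', 'o'] [] (by decide) (by decide)
    have e2 := pv_sw2 c H T heq hH "no, " ['n', 'o', ','] [] (by decide) (by decide)
    have e3 := pv_sw2 c H T heq hH "actually " ['a', 'c', 't', 'u', 'a', 'l', 'l', 'y'] [] (by decide) (by decide)
    have e4 := pv_sw2 c H T heq hH "actually, " ['a', 'c', 't', 'u', 'a', 'l', 'l', 'y', ','] [] (by decide) (by decide)
    have e5 := pv_sw2 c H T heq hH "sorry " ['s', 'o', 'r', 'r', 'y'] [] (by decide) (by decide)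
    have e6 := pv_sw2 c H T heq hH "sorry, " ['s', 'o', 'r', 'r', 'y', ','] [] (by decide) (by decide)
    have e7 := pv_sw2 c H T heq hH "i mean " ['i'] ['m', 'e', 'a', 'n', ' '] (by decide) (by decide)
    have e8 := pv_sw2 c H T heq hH "i mean, " ['i'] ['m', 'e', 'a', 'n', ',', ' '] (by decide) (by decide)
    have e9 := pv_sw2 c H T heq hH "wait " ['w', 'a', 'i', 't'] [] (by decide) (by decide)
    have e10 := pv_sw2 c H T heq hH "wait, " ['w', 'a', 'i', 't', ','] [] (by decide) (by decide)
    have e11 := pv_sw2 c H T heq hH "not that " ['n', 'o', 't'] ['t', 'h', 'a', 't', ' '] (by decide) (by decide)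
    have e12 := pv_sw2 c H T heq hH "not this " ['n', 'o', 't'] ['t', 'h', 'i', 's', ' '] (by decide) (by decide)
    have e13 := pv_sw2 c H T heq hH "instead " ['i', 'n', 's', 't', 'e', 'a', 'd'] [] (by decide) (by decide)
    by_cases hw1 : H = ['n', 'o']
    · subst hw1
      have hout : PySem.Str.slice c (some (PySem.Str.len "no ")) none = String.ofList T := by
        simp only [PySem.Str.slice, PySem.Chars.slice_eq_listSlice, heq]
        rw [show PySem.Str.len "no " = ((3 : Nat) : Int) from by decide,
            PySem.List.slice_from_natCast]
        try rfl
      simp only [pvLoopA, pvPrefixes, e1, e2, e3, e4, e5, e6, e7, e8, e9, e10, e11, e12, e13, hfind, hhead, htail, hout]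
      simp [pvOneWordHeads, show String.ofList ['n', 'o'] = "no" from by decide, List.nil_prefix]
    by_cases hw2 : H = ['n', 'o', ',']
    · subst hw2
      have hout : PySem.Str.slice c (some (PySem.Str.len "no, ")) none = String.ofList T := by
        simp only [PySem.Str.slice, PySem.Chars.slice_eq_listSlice, heq]
        rw [show PySem.Str.len "no, " = ((4 : Nat) : Int) from by decide,
            PySem.List.slice_from_natCast]
        try rfl
      simp only [pvLoopA, pvPrefixes, e1, e2, e3, e4, e5, e6, e7, e8, e9, e10, e11, e12, e13, hfind, hhead, htail, hout]
      simp [pvOneWordHeads, show String.ofList ['n', 'o', ','] = "no," from by decide, List.nil_prefix]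
    by_cases hw3 : H = ['a', 'c', 't', 'u', 'a', 'l', 'l', 'y']
    · subst hw3
      have hout : PySem.Str.slice c (some (PySem.Str.len "actually ")) none = String.ofList T := by
        simp only [PySem.Str.slice, PySem.Chars.slice_eq_listSlice, heq]
        rw [show PySem.Str.len "actually " = ((9 : Nat) : Int) from by decide,
            PySem.List.slice_from_natCast]
        try rfl
      simp only [pvLoopA, pvPrefixes, e1, e2, e3, e4, e5, e6, e7, e8, e9, e10, e11, e12, e13, hfind, hhead, htail, hout]
      simp [pvOneWordHeads, show String.ofList ['a', 'c', 't', 'u', 'a', 'l', 'l', 'y'] = "actually" from by decide, List.nil_prefix]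
    by_cases hw4 : H = ['a', 'c', 't', 'u', 'a', 'l', 'l', 'y', ',']
    · subst hw4
      have hout : PySem.Str.slice c (some (PySem.Str.len "actually, ")) none = String.ofList T := by
        simp only [PySem.Str.slice, PySem.Chars.slice_eq_listSlice, heq]
        rw [show PySem.Str.len "actually, " = ((10 : Nat) : Int) from by decide,
            PySem.List.slice_from_natCast]
        try rfl
      simp only [pvLoopA, pvPrefixes, e1, e2, e3, e4, e5, e6, e7, e8, e9, e10, e11, e12, e13, hfind, hhead, htail, hout]
      simp [pvOneWordHeads, show String.ofList ['a', 'c', 't', 'u', 'a', 'l', 'l', 'y', ','] = "actually," from by decide, List.nil_prefix]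
    by_cases hw5 : H = ['s', 'o', 'r', 'r', 'y']
    · subst hw5
      have hout : PySem.Str.slice c (some (PySem.Str.len "sorry ")) none = String.ofList T := by
        simp only [PySem.Str.slice, PySem.Chars.slice_eq_listSlice, heq]
        rw [show PySem.Str.len "sorry " = ((6 : Nat) : Int) from by decide,
            PySem.List.slice_from_natCast]
        try rfl
      simp only [pvLoopA, pvPrefixes, e1, e2, e3, e4, e5, e6, e7, e8, e9, e10, e11, e12, e13, hfind, hhead, htail, hout]
      simp [pvOneWordHeads, show String.ofList ['s', 'o', 'r', 'r', 'y'] = "sorry" from by decide, List.nil_prefix]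
    by_cases hw6 : H = ['s', 'o', 'r', 'r', 'y', ',']
    · subst hw6
      have hout : PySem.Str.slice c (some (PySem.Str.len "sorry, ")) none = String.ofList T := by
        simp only [PySem.Str.slice, PySem.Chars.slice_eq_listSlice, heq]
        rw [show PySem.Str.len "sorry, " = ((7 : Nat) : Int) from by decide,
            PySem.List.slice_from_natCast]
        try rfl
      simp only [pvLoopA, pvPrefixes, e1, e2, e3, e4, e5, e6, e7, e8, e9, e10, e11, e12, e13, hfind, hhead, htail, hout]
      simp [pvOneWordHeads, show String.ofList ['s', 'o', 'r', 'r', 'y', ','] = "sorry," from by decide, List.nil_prefix]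
    by_cases hw7 : H = ['w', 'a', 'i', 't']
    · subst hw7
      have hout : PySem.Str.slice c (some (PySem.Str.len "wait ")) none = String.ofList T := by
        simp only [PySem.Str.slice, PySem.Chars.slice_eq_listSlice, heq]
        rw [show PySem.Str.len "wait " = ((5 : Nat) : Int) from by decide,
            PySem.List.slice_from_natCast]
        try rfl
      simp only [pvLoopA, pvPrefixes, e1, e2, e3, e4, e5, e6, e7, e8, e9, e10, e11, e12, e13, hfind, hhead, htail, hout]
      simp [pvOneWordHeads, show String.ofList ['w', 'a', 'i', 't'] = "wait" from by decide, List.nil_prefix]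
    by_cases hw8 : H = ['w', 'a', 'i', 't', ',']
    · subst hw8
      have hout : PySem.Str.slice c (some (PySem.Str.len "wait, ")) none = String.ofList T := by
        simp only [PySem.Str.slice, PySem.Chars.slice_eq_listSlice, heq]
        rw [show PySem.Str.len "wait, " = ((6 : Nat) : Int) from by decide,
            PySem.List.slice_from_natCast]
        try rfl
      simp only [pvLoopA, pvPrefixes, e1, e2, e3, e4, e5, e6, e7, e8, e9, e10, e11, e12, e13, hfind, hhead, htail, hout]
      simp [pvOneWordHeads, show String.ofList ['w', 'a', 'i', 't', ','] = "wait," from by decide, List.nil_prefix]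
    by_cases hw9 : H = ['i', 'n', 's', 't', 'e', 'a', 'd']
    · subst hw9
      have hout : PySem.Str.slice c (some (PySem.Str.len "instead ")) none = String.ofList T := by
        simp only [PySem.Str.slice, PySem.Chars.slice_eq_listSlice, heq]
        rw [show PySem.Str.len "instead " = ((8 : Nat) : Int) from by decide,
            PySem.List.slice_from_natCast]
        try rfl
      simp only [pvLoopA, pvPrefixes, e1, e2, e3, e4, e5, e6, e7, e8, e9, e10, e11, e12, e13, hfind, hhead, htail, hout]
      simp [pvOneWordHeads, show String.ofList ['i', 'n', 's', 't', 'e', 'a', 'd'] = "instead" from by decide, List.nil_prefix]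
    by_cases hi : H = ['i']
    · subst hi
      by_cases hsp2 : ' ' ∈ T
      · obtain ⟨H2, T2, rfl, hH2⟩ := pv_first_split hsp2
        have hf2 : PySem.Str.find (String.ofList (H2 ++ ' ' :: T2)) " " = (H2.length : Int) := by
          simp only [PySem.Str.find, pv_toList_ofList, show (" " : String).toList = [' '] from by decide]
          exact pv_findSpace H2 T2 hH2
        have hh2 := pv_slice_head (String.ofList (H2 ++ ' ' :: T2)) H2 T2 (pv_toList_ofList _)
        have ht2 := pv_slice_tail (String.ofList (H2 ++ ' ' :: T2)) H2 T2 (pv_toList_ofList _)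
        have ki0 : (['m', 'e', 'a', 'n', ' '] <+: H2 ++ ' ' :: T2) ↔ H2 = ['m', 'e', 'a', 'n'] := by
          rw [show (['m', 'e', 'a', 'n', ' '] : List Char) = ['m', 'e', 'a', 'n'] ++ ' ' :: [] from rfl,
              pv_keyL _ _ _ _ (by decide) hH2]
          constructor
          · rintro ⟨h, -⟩; exact h.symm
          · rintro rfl; exact ⟨rfl, List.nil_prefix⟩
        have ki1 : (['m', 'e', 'a', 'n', ',', ' '] <+: H2 ++ ' ' :: T2) ↔ H2 = ['m', 'e', 'a', 'n', ','] := by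
          rw [show (['m', 'e', 'a', 'n', ',', ' '] : List Char) = ['m', 'e', 'a', 'n', ','] ++ ' ' :: [] from rfl,
              pv_keyL _ _ _ _ (by decide) hH2]
          constructor
          · rintro ⟨h, -⟩; exact h.symm
          · rintro rfl; exact ⟨rfl, List.nil_prefix⟩
        by_cases hmi0 : H2 = ['m', 'e', 'a', 'n']
        · subst hmi0
          have hout : PySem.Str.slice c (some (PySem.Str.len "i mean ")) none = String.ofList T2 := by
            simp only [PySem.Str.slice, PySem.Chars.slice_eq_listSlice, heq]
            rw [show PySem.Str.len "i mean " = ((7 : Nat) : Int) from by decide,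
                PySem.List.slice_from_natCast]
            try rfl
          simp only [pvLoopA, pvPrefixes, e1, e2, e3, e4, e5, e6, e7, e8, e9, e10, e11, e12, e13, hfind, hhead, htail, hf2, hh2, ht2, hout]
          simp [ki0, ki1, pvOneWordHeads,
                show String.ofList ['i'] = "i" from by decide,
                show String.ofList ['m', 'e', 'a', 'n'] = "mean" from by decide, List.nil_prefix]
        · by_cases hmi1 : H2 = ['m', 'e', 'a', 'n', ',']
          · subst hmi1
            have hout : PySem.Str.slice c (some (PySem.Str.len "i mean, ")) none = String.ofList T2 := by
              simp only [PySem.Str.slice, PySem.Chars.slice_eq_listSlice, heq]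
              rw [show PySem.Str.len "i mean, " = ((8 : Nat) : Int) from by decide,
                  PySem.List.slice_from_natCast]
              try rfl
            simp only [pvLoopA, pvPrefixes, e1, e2, e3, e4, e5, e6, e7, e8, e9, e10, e11, e12, e13, hfind, hhead, htail, hf2, hh2, ht2, hout]
            simp [ki0, ki1, pvOneWordHeads,
                  show String.ofList ['i'] = "i" from by decide,
                  show String.ofList ['m', 'e', 'a', 'n', ','] = "mean," from by decide, List.nil_prefix]
          · simp only [pvLoopA, pvPrefixes, e1, e2, e3, e4, e5, e6, e7, e8, e9, e10, e11, e12, e13, hfind, hhead, htail, hf2, hh2]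
            simp [ki0, ki1, hmi0, hmi1, pvOneWordHeads, pv_ofList_eq_iff,
                  show String.ofList ['i'] = "i" from by decide, List.nil_prefix,
                  show ("no" : String).toList = ['n', 'o'] from by decide,
                  show ("no," : String).toList = ['n', 'o', ','] from by decide,
                  show ("actually" : String).toList = ['a', 'c', 't', 'u', 'a', 'l', 'l', 'y'] from by decide,
                  show ("actually," : String).toList = ['a', 'c', 't', 'u', 'a', 'l', 'l', 'y', ','] from by decide,
                  show ("sorry" : String).toList = ['s', 'o', 'r', 'r', 'y'] from by decide,
                  show ("sorry," : String).toList = ['s', 'o', 'r', 'r', 'y', ','] from by decide,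
                  show ("wait" : String).toList = ['w', 'a', 'i', 't'] from by decide,
                  show ("wait," : String).toList = ['w', 'a', 'i', 't', ','] from by decide,
                  show ("instead" : String).toList = ['i', 'n', 's', 't', 'e', 'a', 'd'] from by decide,
                  show ("i" : String).toList = ['i'] from by decide,
                  show ("not" : String).toList = ['n', 'o', 't'] from by decide,
                  show ("mean" : String).toList = ['m', 'e', 'a', 'n'] from by decide,
                  show ("mean," : String).toList = ['m', 'e', 'a', 'n', ','] from by decide,
                  show ("that" : String).toList = ['t', 'h', 'a', 't'] from by decide,
                  show ("this" : String).toList = ['t', 'h', 'i', 's'] from by decide]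
      · have hf2 : PySem.Str.find (String.ofList T) " " = -1 := by
          simp only [PySem.Str.find, pv_toList_ofList, show (" " : String).toList = [' '] from by decide]
          exact (PySem.Chars.find_eq_neg_one_iff _ _).mpr (fun hinf => hsp2 (hinf.subset (by decide)))
        have kfi0 : ¬ (['m', 'e', 'a', 'n', ' '] <+: T) := fun h => hsp2 (h.subset (by decide))
        have kfi1 : ¬ (['m', 'e', 'a', 'n', ',', ' '] <+: T) := fun h => hsp2 (h.subset (by decide))
        simp only [pvLoopA, pvPrefixes, e1, e2, e3, e4, e5, e6, e7, e8, e9, e10, e11, e12, e13, hfind, hhead, htail, hf2]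
        simp [kfi0, kfi1, pvOneWordHeads, pv_ofList_eq_iff,
              show String.ofList ['i'] = "i" from by decide,
              show ("no" : String).toList = ['n', 'o'] from by decide,
              show ("no," : String).toList = ['n', 'o', ','] from by decide,
              show ("actually" : String).toList = ['a', 'c', 't', 'u', 'a', 'l', 'l', 'y'] from by decide,
              show ("actually," : String).toList = ['a', 'c', 't', 'u', 'a', 'l', 'l', 'y', ','] from by decide,
              show ("sorry" : String).toList = ['s', 'o', 'r', 'r', 'y'] from by decide,
              show ("sorry," : String).toList = ['s', 'o', 'r', 'r', 'y', ','] from by decide,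
              show ("wait" : String).toList = ['w', 'a', 'i', 't'] from by decide,
              show ("wait," : String).toList = ['w', 'a', 'i', 't', ','] from by decide,
              show ("instead" : String).toList = ['i', 'n', 's', 't', 'e', 'a', 'd'] from by decide,
              show ("i" : String).toList = ['i'] from by decide,
              show ("not" : String).toList = ['n', 'o', 't'] from by decide,
              show ("mean" : String).toList = ['m', 'e', 'a', 'n'] from by decide,
              show ("mean," : String).toList = ['m', 'e', 'a', 'n', ','] from by decide,
              show ("that" : String).toList = ['t', 'h', 'a', 't'] from by decide,
              show ("this" : String).toList = ['t', 'h', 'i', 's'] from by decide]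
    by_cases hnot : H = ['n','o','t']
    · subst hnot
      by_cases hsp2 : ' ' ∈ T
      · obtain ⟨H2, T2, rfl, hH2⟩ := pv_first_split hsp2
        have hf2 : PySem.Str.find (String.ofList (H2 ++ ' ' :: T2)) " " = (H2.length : Int) := by
          simp only [PySem.Str.find, pv_toList_ofList, show (" " : String).toList = [' '] from by decide]
          exact pv_findSpace H2 T2 hH2
        have hh2 := pv_slice_head (String.ofList (H2 ++ ' ' :: T2)) H2 T2 (pv_toList_ofList _)
        have ht2 := pv_slice_tail (String.ofList (H2 ++ ' ' :: T2)) H2 T2 (pv_toList_ofList _)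
        have knot0 : (['t', 'h', 'a', 't', ' '] <+: H2 ++ ' ' :: T2) ↔ H2 = ['t', 'h', 'a', 't'] := by
          rw [show (['t', 'h', 'a', 't', ' '] : List Char) = ['t', 'h', 'a', 't'] ++ ' ' :: [] from rfl,
              pv_keyL _ _ _ _ (by decide) hH2]
          constructor
          · rintro ⟨h, -⟩; exact h.symm
          · rintro rfl; exact ⟨rfl, List.nil_prefix⟩
        have knot1 : (['t', 'h', 'i', 's', ' '] <+: H2 ++ ' ' :: T2) ↔ H2 = ['t', 'h', 'i', 's'] := by
          rw [show (['t', 'h', 'i', 's', ' '] : List Char) = ['t', 'h', 'i', 's'] ++ ' ' :: [] from rfl,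
              pv_keyL _ _ _ _ (by decide) hH2]
          constructor
          · rintro ⟨h, -⟩; exact h.symm
          · rintro rfl; exact ⟨rfl, List.nil_prefix⟩
        by_cases hmnot0 : H2 = ['t', 'h', 'a', 't']
        · subst hmnot0
          have hout : PySem.Str.slice c (some (PySem.Str.len "not that ")) none = String.ofList T2 := by
            simp only [PySem.Str.slice, PySem.Chars.slice_eq_listSlice, heq]
            rw [show PySem.Str.len "not that " = ((9 : Nat) : Int) from by decide,
                PySem.List.slice_from_natCast]
            try rfl
          simp only [pvLoopA, pvPrefixes, e1, e2, e3, e4, e5, e6, e7, e8, e9, e10, e11, e12, e13, hfind, hhead, htail, hf2, hh2, ht2, hout]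
          simp [knot0, knot1, pvOneWordHeads,
                show String.ofList ['n', 'o', 't'] = "not" from by decide,
                show String.ofList ['t', 'h', 'a', 't'] = "that" from by decide, List.nil_prefix]
        · by_cases hmnot1 : H2 = ['t', 'h', 'i', 's']
          · subst hmnot1
            have hout : PySem.Str.slice c (some (PySem.Str.len "not this ")) none = String.ofList T2 := by
              simp only [PySem.Str.slice, PySem.Chars.slice_eq_listSlice, heq]
              rw [show PySem.Str.len "not this " = ((9 : Nat) : Int) from by decide,
                  PySem.List.slice_from_natCast]
              try rfl
            simp only [pvLoopA, pvPrefixes, e1, e2, e3, e4, e5, e6, e7, e8, e9, e10, e11, e12, e13, hfind, hhead, htail, hf2, hh2, ht2, hout]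
            simp [knot0, knot1, pvOneWordHeads,
                  show String.ofList ['n', 'o', 't'] = "not" from by decide,
                  show String.ofList ['t', 'h', 'i', 's'] = "this" from by decide, List.nil_prefix]
          · simp only [pvLoopA, pvPrefixes, e1, e2, e3, e4, e5, e6, e7, e8, e9, e10, e11, e12, e13, hfind, hhead, htail, hf2, hh2]
            simp [knot0, knot1, hmnot0, hmnot1, pvOneWordHeads, pv_ofList_eq_iff,
                  show String.ofList ['n', 'o', 't'] = "not" from by decide, List.nil_prefix,
                  show ("no" : String).toList = ['n', 'o'] from by decide,
                  show ("no," : String).toList = ['n', 'o', ','] from by decide,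
                  show ("actually" : String).toList = ['a', 'c', 't', 'u', 'a', 'l', 'l', 'y'] from by decide,
                  show ("actually," : String).toList = ['a', 'c', 't', 'u', 'a', 'l', 'l', 'y', ','] from by decide,
                  show ("sorry" : String).toList = ['s', 'o', 'r', 'r', 'y'] from by decide,
                  show ("sorry," : String).toList = ['s', 'o', 'r', 'r', 'y', ','] from by decide,
                  show ("wait" : String).toList = ['w', 'a', 'i', 't'] from by decide,
                  show ("wait," : String).toList = ['w', 'a', 'i', 't', ','] from by decide,
                  show ("instead" : String).toList = ['i', 'n', 's', 't', 'e', 'a', 'd'] from by decide,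
                  show ("i" : String).toList = ['i'] from by decide,
                  show ("not" : String).toList = ['n', 'o', 't'] from by decide,
                  show ("mean" : String).toList = ['m', 'e', 'a', 'n'] from by decide,
                  show ("mean," : String).toList = ['m', 'e', 'a', 'n', ','] from by decide,
                  show ("that" : String).toList = ['t', 'h', 'a', 't'] from by decide,
                  show ("this" : String).toList = ['t', 'h', 'i', 's'] from by decide]
      · have hf2 : PySem.Str.find (String.ofList T) " " = -1 := by
          simp only [PySem.Str.find, pv_toList_ofList, show (" " : String).toList = [' '] from by decide]
          exact (PySem.Chars.find_eq_neg_one_iff _ _).mpr (fun hinf => hsp2 (hinf.subset (by decide)))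
        have kfnot0 : ¬ (['t', 'h', 'a', 't', ' '] <+: T) := fun h => hsp2 (h.subset (by decide))
        have kfnot1 : ¬ (['t', 'h', 'i', 's', ' '] <+: T) := fun h => hsp2 (h.subset (by decide))
        simp only [pvLoopA, pvPrefixes, e1, e2, e3, e4, e5, e6, e7, e8, e9, e10, e11, e12, e13, hfind, hhead, htail, hf2]
        simp [kfnot0, kfnot1, pvOneWordHeads, pv_ofList_eq_iff,
              show String.ofList ['n', 'o', 't'] = "not" from by decide,
              show ("no" : String).toList = ['n', 'o'] from by decide,
              show ("no," : String).toList = ['n', 'o', ','] from by decide,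
              show ("actually" : String).toList = ['a', 'c', 't', 'u', 'a', 'l', 'l', 'y'] from by decide,
              show ("actually," : String).toList = ['a', 'c', 't', 'u', 'a', 'l', 'l', 'y', ','] from by decide,
              show ("sorry" : String).toList = ['s', 'o', 'r', 'r', 'y'] from by decide,
              show ("sorry," : String).toList = ['s', 'o', 'r', 'r', 'y', ','] from by decide,
              show ("wait" : String).toList = ['w', 'a', 'i', 't'] from by decide,
              show ("wait," : String).toList = ['w', 'a', 'i', 't', ','] from by decide,
              show ("instead" : String).toList = ['i', 'n', 's', 't', 'e', 'a', 'd'] from by decide,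
              show ("i" : String).toList = ['i'] from by decide,
              show ("not" : String).toList = ['n', 'o', 't'] from by decide,
              show ("mean" : String).toList = ['m', 'e', 'a', 'n'] from by decide,
              show ("mean," : String).toList = ['m', 'e', 'a', 'n', ','] from by decide,
              show ("that" : String).toList = ['t', 'h', 'a', 't'] from by decide,
              show ("this" : String).toList = ['t', 'h', 'i', 's'] from by decide]
    -- no head word matches: both sides fall through to cleaned
    simp only [pvLoopA, pvPrefixes, e1, e2, e3, e4, e5, e6, e7, e8, e9, e10, e11, e12, e13, hfind, hhead, htail]
    simp [hw1, hw2, hw3, hw4, hw5, hw6, hw7, hw8, hw9, hi, hnot, pvOneWordHeads, pv_ofList_eq_iff,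
          show ¬ ((H.length : Int) < 0) from by omega,
          show ("no" : String).toList = ['n', 'o'] from by decide,
          show ("no," : String).toList = ['n', 'o', ','] from by decide,
          show ("actually" : String).toList = ['a', 'c', 't', 'u', 'a', 'l', 'l', 'y'] from by decide,
          show ("actually," : String).toList = ['a', 'c', 't', 'u', 'a', 'l', 'l', 'y', ','] from by decide,
          show ("sorry" : String).toList = ['s', 'o', 'r', 'r', 'y'] from by decide,
          show ("sorry," : String).toList = ['s', 'o', 'r', 'r', 'y', ','] from by decide,
          show ("wait" : String).toList = ['w', 'a', 'i', 't'] from by decide,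
          show ("wait," : String).toList = ['w', 'a', 'i', 't', ','] from by decide,
          show ("instead" : String).toList = ['i', 'n', 's', 't', 'e', 'a', 'd'] from by decide,
          show ("i" : String).toList = ['i'] from by decide,
          show ("not" : String).toList = ['n', 'o', 't'] from by decide,
          show ("mean" : String).toList = ['m', 'e', 'a', 'n'] from by decide,
          show ("mean," : String).toList = ['m', 'e', 'a', 'n', ','] from by decide,
          show ("that" : String).toList = ['t', 'h', 'a', 't'] from by decide,
          show ("this" : String).toList = ['t', 'h', 'i', 's'] from by decide]
  · have hf : PySem.Str.find c " " = -1 := by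
      simp only [PySem.Str.find, show (" " : String).toList = [' '] from by decide]
      exact (PySem.Chars.find_eq_neg_one_iff _ _).mpr (fun hinf => hsp (hinf.subset (by decide)))
    rw [pv_loopA_all_false c pvPrefixes ?allfalse]
    case allfalse =>
      intro p hp
      simp only [pvPrefixes, List.mem_cons, List.not_mem_nil, or_false] at hp
      rcases hp with rfl | rfl | rfl | rfl | rfl | rfl | rfl | rfl | rfl | rfl | rfl | rfl | rfl <;>
        exact pv_sw_false_of_no_space c hsp _ (by decide)
    simp only [hf]
    norm_num

-- ===== VERDICT (by name: the statement is the Claim_ definition above) =====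
theorem strip_correction_prefixes_py_spec : Claim_equal_strip_correction_prefixes_py := by
  intro text _
  unfold Spec_strip_correction_prefixes_py strip_correction_prefixes_py strip_correction_prefixes_py_alt
  exact pv_central (PySem.Str.lower (PySem.Str.strip text))
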